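-- pv_equiv track=rewrite | github.com/pypi-data/pypi-mirror-382 | packages/aworld/aworld-0.2.8.tar.gz/aworld-0.2.8/aworld/core/context/processor/chunk_utils.py | _string_to_tool_messages
-- ===== SOURCE A (Python) =====
-- from typing import List, Dict, Any, Union
--
-- def _string_to_tool_messages(content: str, original_prompt: Union[str, List[Dict[str, str]]]) -> List[
--     Dict[str, str]]:
--     """Convert string to tool message format"""
--     messages = []
--     lines = content.split('\n')
--     current_role = 'tool'
--     current_content = []
--     current_tool_call_id = ''
--     current_name = ''
--
--     for line in lines:
--         line = line.strip()
--         if line.startswith('[') and ']:' in line: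
--             # Save previous message
--             if current_content:
--                 msg = {
--                     'role': current_role,
--                     'content': '\n'.join(current_content).strip()
--                 }
--                 if current_role == 'tool':
--                     if current_tool_call_id:
--                         msg['tool_call_id'] = current_tool_call_id
--                     if current_name:
--                         msg['name'] = current_name
--                 messages.append(msg)
--                 current_content = []
--
--             # Parse new role and tool information
--             role_end = line.find(']:')
--             role_part = line[1:role_end]
--             content_part = line[role_end + 2:].strip()
--
--             if role_part.startswith('TOOL:'):
--                 # Parse tool message format: [TOOL:name:tool_call_id]
--                 current_role = 'tool'
--                 tool_parts = role_part.split(':')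
--                 if len(tool_parts) >= 2:
--                     current_name = tool_parts[1]
--                 if len(tool_parts) >= 3:
--                     current_tool_call_id = tool_parts[2]
--             else:
--                 current_role = role_part.lower()
--                 current_tool_call_id = ''
--                 current_name = ''
--
--             if content_part:
--                 current_content.append(content_part)
--         else:
--             current_content.append(line)
--
--     # Save last message
--     if current_content:
--         msg = {
--             'role': current_role,
--             'content': '\n'.join(current_content).strip()
--         }
--         if current_role == 'tool':
--             if current_tool_call_id:
--                 msg['tool_call_id'] = current_tool_call_id
--             if current_name:
--                 msg['name'] = current_name
--         messages.append(msg)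
--
--     # If no messages parsed, return original format
--     if not messages and isinstance(original_prompt, list):
--         return original_prompt
--     elif not messages:
--         return [{'role': 'tool', 'content': content}]
--
--     return messages
-- ===== SOURCE B (Python) =====
-- from typing import List, Dict, Any, Union
--
-- def _string_to_tool_messages(content: str, original_prompt: Union[str, List[Dict[str, str]]]) -> List[Dict[str, str]]:
--     """Convert string to tool message format (group-then-process decomposition)."""
--     # Phase 1: group stripped lines into a leading block plus one block per header line.
--     blocks = [(None, [])]
--     for raw in content.split('\n'):
--         line = raw.strip()
--         if line.startswith('[') and ']:' in line:
--             blocks.append((line, []))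
--         else:
--             blocks[-1][1].append(line)
--     # Phase 2: walk the blocks carrying role/name/tool_call_id state, emitting messages.
--     messages = []
--     role, name, call_id = 'tool', '', ''
--     for header, body in blocks:
--         pieces = []
--         if header is not None:
--             end = header.find(']:')
--             role_part = header[1:end]
--             tail = header[end + 2:].strip()
--             if role_part.startswith('TOOL:'):
--                 role = 'tool'
--                 parts = role_part.split(':')
--                 if len(parts) >= 2:
--                     name = parts[1]
--                 if len(parts) >= 3:
--                     call_id = parts[2]
--             else:
--                 role, name, call_id = role_part.lower(), '', ''
--             if tail:
--                 pieces.append(tail)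
--         pieces.extend(body)
--         if pieces:
--             msg = {'role': role, 'content': '\n'.join(pieces).strip()}
--             if role == 'tool':
--                 if call_id:
--                     msg['tool_call_id'] = call_id
--                 if name:
--                     msg['name'] = name
--             messages.append(msg)
--     if messages:
--         return messages
--     if isinstance(original_prompt, list):
--         return original_prompt
--     return [{'role': 'tool', 'content': content}]
-- ===== Notes on version B (the rewrite author's own statement) =====
-- stated objective: alternative
-- what changed: B first groups the stripped lines into a leading block plus one block per header line, then emits messages in a second pass threading role/name/tool_call_id state, instead of A's single inline state machine that flushes the accumulated content at each header.
import Mathlib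
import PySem

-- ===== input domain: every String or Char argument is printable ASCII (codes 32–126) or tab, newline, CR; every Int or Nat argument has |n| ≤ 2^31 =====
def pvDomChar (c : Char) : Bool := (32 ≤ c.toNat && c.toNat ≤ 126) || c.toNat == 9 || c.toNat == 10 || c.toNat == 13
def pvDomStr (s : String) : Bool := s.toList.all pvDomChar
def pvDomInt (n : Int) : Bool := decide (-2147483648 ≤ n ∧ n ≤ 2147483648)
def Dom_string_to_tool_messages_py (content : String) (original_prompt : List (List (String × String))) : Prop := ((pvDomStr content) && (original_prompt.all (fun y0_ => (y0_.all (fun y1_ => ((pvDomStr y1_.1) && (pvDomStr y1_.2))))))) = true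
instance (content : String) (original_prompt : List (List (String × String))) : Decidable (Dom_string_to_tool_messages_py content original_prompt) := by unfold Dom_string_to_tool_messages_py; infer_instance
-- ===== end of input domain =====

-- B regroups the lines into header-delimited blocks first and emits messages in a second pass,
-- instead of A's single inline state machine; objective: alternative decomposition (same cost).
-- In this typed port original_prompt is always a list, so Python's 'isinstance(original_prompt, list)'
-- branch is always taken when no messages were parsed (the str fallback is unreachable).

-- ===== PORT A =====
-- the message dict built by A's 'save message' code (appears twice in the Python)
def pvMsgA (role cid name : String) (cc : List String) : List (String × String) :=
  [("role", role), ("content", PySem.Str.strip (PySem.Str.join "\n" cc))] ++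
    (if role == "tool" then
      (if cid == "" then [] else [("tool_call_id", cid)]) ++
      (if name == "" then [] else [("name", name)])
    else [])

-- A's 'if current_content: messages.append(msg)' block
def pvFlushA (msgs : List (List (String × String))) (role cid name : String) (cc : List String) :
    List (List (String × String)) :=
  if cc = [] then msgs else msgs ++ [pvMsgA role cid name cc]

def pvStepA (st : List (List (String × String)) × String × List String × String × String)
    (rawLine : String) : List (List (String × String)) × String × List String × String × String :=
  match st with
  | (msgs, role, cc, cid, name) =>
    let line := PySem.Str.strip rawLine
    if PySem.Str.startswith line "[" && PySem.Str.isIn "]:" line then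
      let msgs := pvFlushA msgs role cid name cc
      let roleEnd := PySem.Str.find line "]:"
      let rolePart := PySem.Str.slice line (some 1) (some roleEnd)
      let contentPart := PySem.Str.strip (PySem.Str.slice line (some (roleEnd + 2)) none)
      if PySem.Str.startswith rolePart "TOOL:" then
        let toolParts := (PySem.Str.split? rolePart ":").getD []
        let name := if 2 ≤ toolParts.length then toolParts.getD 1 name else name
        let cid := if 3 ≤ toolParts.length then toolParts.getD 2 cid else cid
        (msgs, "tool", if contentPart = "" then [] else [contentPart], cid, name)
      else
        (msgs, PySem.Str.lower rolePart, if contentPart = "" then [] else [contentPart], "", "")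
    else
      (msgs, role, cc ++ [line], cid, name)

def string_to_tool_messages_py (content : String) (original_prompt : List (List (String × String))) :
    List (List (String × String)) :=
  let lines := (PySem.Str.split? content "\n").getD []
  match lines.foldl pvStepA ([], "tool", [], "", "") with
  | (msgs, role, cc, cid, name) =>
    let messages := pvFlushA msgs role cid name cc
    if messages = [] then original_prompt else messages

-- ===== PORT B =====
def pvMsgB (role cid name : String) (pieces : List String) : List (String × String) :=
  [("role", role), ("content", PySem.Str.strip (PySem.Str.join "\n" pieces))] ++
    (if role == "tool" then
      (if cid == "" then [] else [("tool_call_id", cid)]) ++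
      (if name == "" then [] else [("name", name)])
    else [])

-- 'blocks[-1][1].append(line)'
def pvAppendLast (blocks : List (Option String × List String)) (line : String) :
    List (Option String × List String) :=
  match blocks.getLast? with
  | some b => blocks.dropLast ++ [(b.1, b.2 ++ [line])]
  | none => blocks

-- phase 1: group stripped lines into blocks
def pvGroup (blocks : List (Option String × List String)) (raw : String) :
    List (Option String × List String) :=
  let line := PySem.Str.strip raw
  if PySem.Str.startswith line "[" && PySem.Str.isIn "]:" line then
    blocks ++ [(some line, [])]
  else
    pvAppendLast blocks line

-- phase 2: one block, threading (messages, role, name, call_id)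
def pvEmit (st : List (List (String × String)) × String × String × String)
    (block : Option String × List String) :
    List (List (String × String)) × String × String × String :=
  match st, block with
  | (msgs, role, name, cid), (header?, body) =>
    match header? with
    | none =>
      let pieces := body
      if pieces = [] then (msgs, role, name, cid)
      else (msgs ++ [pvMsgB role cid name pieces], role, name, cid)
    | some header =>
      let e := PySem.Str.find header "]:"
      let rolePart := PySem.Str.slice header (some 1) (some e)
      let tail := PySem.Str.strip (PySem.Str.slice header (some (e + 2)) none)
      if PySem.Str.startswith rolePart "TOOL:" then
        let parts := (PySem.Str.split? rolePart ":").getD []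
        let name := if 2 ≤ parts.length then parts.getD 1 name else name
        let cid := if 3 ≤ parts.length then parts.getD 2 cid else cid
        let pieces := (if tail = "" then [] else [tail]) ++ body
        if pieces = [] then (msgs, "tool", name, cid)
        else (msgs ++ [pvMsgB "tool" cid name pieces], "tool", name, cid)
      else
        let role := PySem.Str.lower rolePart
        let pieces := (if tail = "" then [] else [tail]) ++ body
        if pieces = [] then (msgs, role, "", "")
        else (msgs ++ [pvMsgB role "" "" pieces], role, "", "")

def string_to_tool_messages_py_alt (content : String) (original_prompt : List (List (String × String))) :
    List (List (String × String)) :=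
  let blocks := ((PySem.Str.split? content "\n").getD []).foldl pvGroup [(none, [])]
  let messages := (blocks.foldl pvEmit ([], "tool", "", "")).1
  if messages ≠ [] then messages else original_prompt

-- ===== PRECONDITION & SPEC =====
def Spec_string_to_tool_messages_py (content : String) (original_prompt : List (List (String × String))) (out : List (List (String × String))) : Prop := out = string_to_tool_messages_py_alt content original_prompt
instance (content : String) (original_prompt : List (List (String × String))) (out : List (List (String × String))) : Decidable (Spec_string_to_tool_messages_py content original_prompt out) := by unfold Spec_string_to_tool_messages_py; infer_instance

-- ===== CLAIM (what is proved, stated in full; the proofs are below) =====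
def Claim_equal_string_to_tool_messages_py : Prop := ∀ (content : String) (original_prompt : List (List (String × String))), Dom_string_to_tool_messages_py content original_prompt → Spec_string_to_tool_messages_py content original_prompt (string_to_tool_messages_py content original_prompt)

-- ===== LEMMAS AND PROOFS =====
def pvHdr (line : String) : Bool :=
  PySem.Str.startswith line "[" && PySem.Str.isIn "]:" line

-- stripped non-header lines up to the first header
def pvBodySpec : List String → List String
  | [] => []
  | l :: ls =>
    if pvHdr (PySem.Str.strip l) then [] else PySem.Str.strip l :: pvBodySpec ls

-- the header-led blocks of a line list
def pvRestSpec : List String → List (Option String × List String)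
  | [] => []
  | l :: ls =>
    if pvHdr (PySem.Str.strip l) then (some (PySem.Str.strip l), pvBodySpec ls) :: pvRestSpec ls
    else pvRestSpec ls

-- A's final 'save last message'
def pvFinishA (st : List (List (String × String)) × String × List String × String × String) :
    List (List (String × String)) :=
  match st with
  | (msgs, role, cc, cid, name) => pvFlushA msgs role cid name cc

theorem pvAppendLast_cons (x : Option String × List String)
    (acc : List (Option String × List String)) (l : String) (h : acc ≠ []) :
    pvAppendLast (x :: acc) l = x :: pvAppendLast acc l := by
  cases acc with
  | nil => exact absurd rfl h
  | cons y ys =>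
    unfold pvAppendLast
    cases hb : (y :: ys).getLast? with
    | none => simp at hb
    | some b => simp [hb]

theorem pvGroup_cons (ls : List String) : ∀ (x : Option String × List String)
    (acc : List (Option String × List String)), acc ≠ [] →
    ls.foldl pvGroup (x :: acc) = x :: ls.foldl pvGroup acc := by
  induction ls with
  | nil => intro x acc _; rfl
  | cons l ls ih =>
    intro x acc h
    by_cases hh : (PySem.Str.startswith (PySem.Str.strip l) "[" &&
        PySem.Str.isIn "]:" (PySem.Str.strip l)) = true
    · have h1 : pvGroup (x :: acc) l = x :: (acc ++ [(some (PySem.Str.strip l), [])]) := by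
        simp only [pvGroup]; rw [if_pos hh]; rfl
      have h2 : pvGroup acc l = acc ++ [(some (PySem.Str.strip l), [])] := by
        simp only [pvGroup]; rw [if_pos hh]
      simp only [List.foldl_cons, h1, h2]
      exact ih _ _ (by simp)
    · have h1 : pvGroup (x :: acc) l = x :: pvAppendLast acc (PySem.Str.strip l) := by
        simp only [pvGroup]; rw [if_neg hh]; exact pvAppendLast_cons _ _ _ h
      have h2 : pvGroup acc l = pvAppendLast acc (PySem.Str.strip l) := by
        simp only [pvGroup]; rw [if_neg hh]
      have h3 : pvAppendLast acc (PySem.Str.strip l) ≠ [] := by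
        cases acc with
        | nil => exact absurd rfl h
        | cons y ys =>
          unfold pvAppendLast
          cases hb : (y :: ys).getLast? with
          | none => simp at hb
          | some b => simp
      simp only [List.foldl_cons, h1, h2]
      exact ih _ _ h3

theorem pvGroup_single (ls : List String) : ∀ (hd : Option String) (b : List String),
    ls.foldl pvGroup [(hd, b)] = (hd, b ++ pvBodySpec ls) :: pvRestSpec ls := by
  induction ls with
  | nil => intro hd b; simp [pvBodySpec, pvRestSpec]
  | cons l ls ih =>
    intro hd b
    by_cases hh : (PySem.Str.startswith (PySem.Str.strip l) "[" &&
        PySem.Str.isIn "]:" (PySem.Str.strip l)) = true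
    · have h1 : pvGroup [(hd, b)] l = [(hd, b), (some (PySem.Str.strip l), [])] := by
        simp only [pvGroup]; rw [if_pos hh]; rfl
      simp only [List.foldl_cons, h1]
      rw [pvGroup_cons ls _ _ (by simp), ih]
      simp only [pvBodySpec, pvRestSpec]
      rw [if_pos (show pvHdr (PySem.Str.strip l) = true from hh),
        if_pos (show pvHdr (PySem.Str.strip l) = true from hh)]
      simp
    · have h1 : pvGroup [(hd, b)] l = [(hd, b ++ [PySem.Str.strip l])] := by
        simp only [pvGroup]; rw [if_neg hh]; rfl
      simp only [List.foldl_cons, h1, ih]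
      simp only [pvBodySpec, pvRestSpec]
      rw [if_neg (show ¬ pvHdr (PySem.Str.strip l) = true from hh),
        if_neg (show ¬ pvHdr (PySem.Str.strip l) = true from hh)]
      simp

-- abbreviations for the header-parse results (proof-side only)
def pvRolePart (L : String) : String :=
  PySem.Str.slice L (some 1) (some (PySem.Str.find L "]:"))

def pvTail (L : String) : String :=
  PySem.Str.strip (PySem.Str.slice L (some (PySem.Str.find L "]:" + 2)) none)

def pvParts (L : String) : List String := (PySem.Str.split? (pvRolePart L) ":").getD []

def pvNewRole (L : String) : String :=
  if PySem.Str.startswith (pvRolePart L) "TOOL:" then "tool" else PySem.Str.lower (pvRolePart L)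

def pvNewName (L name : String) : String :=
  if PySem.Str.startswith (pvRolePart L) "TOOL:" then
    (if 2 ≤ (pvParts L).length then (pvParts L).getD 1 name else name)
  else ""

def pvNewCid (L cid : String) : String :=
  if PySem.Str.startswith (pvRolePart L) "TOOL:" then
    (if 3 ≤ (pvParts L).length then (pvParts L).getD 2 cid else cid)
  else ""

def pvCC (L : String) : List String := if pvTail L = "" then [] else [pvTail L]

theorem pvStepA_header (msgs : List (List (String × String))) (role : String)
    (cc : List String) (cid name : String) (l : String)
    (hh : (PySem.Str.startswith (PySem.Str.strip l) "[" &&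
      PySem.Str.isIn "]:" (PySem.Str.strip l)) = true) :
    pvStepA (msgs, role, cc, cid, name) l =
      (pvFlushA msgs role cid name cc, pvNewRole (PySem.Str.strip l), pvCC (PySem.Str.strip l),
        pvNewCid (PySem.Str.strip l) cid, pvNewName (PySem.Str.strip l) name) := by
  simp only [pvStepA, pvNewRole, pvNewName, pvNewCid, pvCC, pvParts, pvRolePart, pvTail]
  rw [if_pos hh]
  by_cases ht : PySem.Str.startswith (PySem.Str.slice (PySem.Str.strip l) (some 1)
      (some (PySem.Str.find (PySem.Str.strip l) "]:"))) "TOOL:" = true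
  · rw [if_pos ht, if_pos ht, if_pos ht, if_pos ht]
  · rw [if_neg ht, if_neg ht, if_neg ht, if_neg ht]

theorem pvEmit_none (msgs : List (List (String × String))) (role name cid : String)
    (body : List String) :
    pvEmit (msgs, role, name, cid) (none, body)
      = (pvFlushA msgs role cid name body, role, name, cid) := by
  cases body <;> simp [pvEmit, pvFlushA, pvMsgA, pvMsgB]

theorem pvEmit_some (msgs : List (List (String × String))) (role name cid : String)
    (L : String) (body : List String) :
    pvEmit (msgs, role, name, cid) (some L, body)
      = pvEmit (msgs, pvNewRole L, pvNewName L name, pvNewCid L cid) (none, pvCC L ++ body) := by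
  simp only [pvEmit, pvNewRole, pvNewName, pvNewCid, pvCC, pvParts, pvRolePart, pvTail]
  by_cases ht : PySem.Str.startswith (PySem.Str.slice L (some 1)
      (some (PySem.Str.find L "]:"))) "TOOL:" = true
  · rw [if_pos ht, if_pos ht, if_pos ht, if_pos ht]
  · rw [if_neg ht, if_neg ht, if_neg ht, if_neg ht]

theorem pvMain (ls : List String) :
    ∀ (msgs : List (List (String × String))) (role : String) (cc : List String)
      (cid name : String),
    pvFinishA (ls.foldl pvStepA (msgs, role, cc, cid, name))
      = (((none, cc ++ pvBodySpec ls) :: pvRestSpec ls).foldl pvEmit (msgs, role, name, cid)).1 := by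
  induction ls with
  | nil =>
    intro msgs role cc cid name
    simp only [List.foldl_nil, pvBodySpec, pvRestSpec, List.append_nil, List.foldl_cons,
      pvFinishA, pvEmit_none]
  | cons l ls ih =>
    intro msgs role cc cid name
    by_cases hh : (PySem.Str.startswith (PySem.Str.strip l) "[" &&
        PySem.Str.isIn "]:" (PySem.Str.strip l)) = true
    · simp only [List.foldl_cons, pvStepA_header _ _ _ _ _ _ hh, ih]
      simp only [pvBodySpec, pvRestSpec]
      rw [if_pos (show pvHdr (PySem.Str.strip l) = true from hh),
        if_pos (show pvHdr (PySem.Str.strip l) = true from hh)]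
      simp only [List.append_nil, List.foldl_cons, pvEmit_none, pvEmit_some]
    · have hA : pvStepA (msgs, role, cc, cid, name) l
          = (msgs, role, cc ++ [PySem.Str.strip l], cid, name) := by
        simp only [pvStepA]; rw [if_neg hh]
      simp only [List.foldl_cons, hA, ih]
      simp only [pvBodySpec, pvRestSpec]
      rw [if_neg (show ¬ pvHdr (PySem.Str.strip l) = true from hh),
        if_neg (show ¬ pvHdr (PySem.Str.strip l) = true from hh)]
      simp

-- ===== VERDICT (by name: the statement is the Claim_ definition above) =====
theorem string_to_tool_messages_py_spec : Claim_equal_string_to_tool_messages_py := by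
  intro content original_prompt _
  unfold Spec_string_to_tool_messages_py string_to_tool_messages_py string_to_tool_messages_py_alt
  dsimp only
  rw [pvGroup_single]
  rw [← pvMain ((PySem.Str.split? content "\n").getD []) [] "tool" [] "" ""]
  rcases hfold : List.foldl pvStepA ([], "tool", [], "", "")
      ((PySem.Str.split? content "\n").getD []) with ⟨m, r, c, ci, na⟩
  simp only [pvFinishA]
  by_cases hX : pvFlushA m r ci na c = [] <;> simp [hX]
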